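-- pv_equiv track=rewrite | github.com/dglee0517/CodingTestStudy | 20230427_python_study.py | solution
-- ===== SOURCE A (Python) =====
-- def solution(a, d, included):
--     list = []
--     sum = 0
--     result = 0
--     for i in range(len(included)):
--         if i ==0:
--             sum = sum + a
--         else:
--             sum = sum + d
--         list.append(sum)
--     for i in range(len(included)):
--         if included[i]:
--             result = result + list[i]
--     return result
-- ===== SOURCE B (Python) =====
-- def solution(a, d, included):
--     count = 0
--     idxsum = 0
--     for i, flag in enumerate(included):
--         if flag:
--             count += 1
--             idxsum += i
--     return a * count + d * idxsum
-- ===== Notes on version B (the rewrite author's own statement) =====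
-- stated objective: simpler
-- what changed: B drops A's intermediate list of sequence terms and its second indexing pass: one enumerate pass accumulates the count of truthy flags and the sum of their indices, then returns a*count + d*idxsum via the closed form term[i] = a + i*d (single pass, no list allocation).
import Mathlib
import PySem

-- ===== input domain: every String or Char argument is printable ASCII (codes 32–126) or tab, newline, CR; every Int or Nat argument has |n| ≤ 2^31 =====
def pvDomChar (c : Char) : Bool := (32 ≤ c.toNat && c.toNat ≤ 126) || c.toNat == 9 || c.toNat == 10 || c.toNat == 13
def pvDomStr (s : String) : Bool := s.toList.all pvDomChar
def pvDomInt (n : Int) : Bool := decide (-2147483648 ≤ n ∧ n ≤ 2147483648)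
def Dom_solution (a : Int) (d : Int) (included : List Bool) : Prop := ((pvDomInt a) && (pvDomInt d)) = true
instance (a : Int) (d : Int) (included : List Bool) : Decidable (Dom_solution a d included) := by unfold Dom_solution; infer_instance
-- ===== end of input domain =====

-- B replaces A's intermediate list of sequence terms and second indexing pass by one
-- enumerate pass accumulating count and index-sum, returning a*count + d*idxsum (simpler).

-- ===== PORT A =====
-- Literal port of A: first loop builds 'list' of running sums (pair state: built list, sum),
-- second loop indexes included[i] and list[i]; indices are always in range, so pyGetD is exact.
def solution (a : Int) (d : Int) (included : List Bool) : Int :=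
  let lst := ((PySem.List.pyRange 0 (included.length : Int) 1).foldl
    (fun (st : List Int × Int) i =>
      let sum := if i == 0 then st.2 + a else st.2 + d
      (st.1 ++ [sum], sum)) (([] : List Int), (0 : Int))).1
  (PySem.List.pyRange 0 (included.length : Int) 1).foldl
    (fun result i =>
      if PySem.List.pyGetD included i false then result + PySem.List.pyGetD lst i 0
      else result) 0

-- ===== PORT B =====
def solution_alt (a : Int) (d : Int) (included : List Bool) : Int :=
  let p := (PySem.List.enumerate included 0).foldl
    (fun (s : Int × Int) (x : Int × Bool) => if x.2 then (s.1 + 1, s.2 + x.1) else s)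
    ((0 : Int), (0 : Int))
  a * p.1 + d * p.2

-- ===== PRECONDITION & SPEC =====
def Spec_solution (a : Int) (d : Int) (included : List Bool) (out : Int) : Prop := out = solution_alt a d included
instance (a : Int) (d : Int) (included : List Bool) (out : Int) : Decidable (Spec_solution a d included out) := by unfold Spec_solution; infer_instance

-- ===== CLAIM (what is proved, stated in full; the proofs are below) =====
def Claim_equal_solution : Prop := ∀ (a : Int) (d : Int) (included : List Bool), Dom_solution a d included → Spec_solution a d included (solution a d included)

-- ===== LEMMAS AND PROOFS =====

-- A's first loop builds exactly the list of terms a + i*d (and the running sum is the last term).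
theorem buildA (a d : Int) : ∀ n : Nat,
    (PySem.List.pyRange 0 (n : Int) 1).foldl
      (fun (st : List Int × Int) i =>
        let sum := if i == 0 then st.2 + a else st.2 + d
        (st.1 ++ [sum], sum)) (([] : List Int), (0 : Int))
    = ((PySem.List.pyRange 0 (n : Int) 1).map (fun i => a + i * d),
       if n = 0 then 0 else a + ((n : Int) - 1) * d) := by
  intro n
  induction n with
  | zero => simp [PySem.List.pyRange_one_eq_nil]
  | succ n ih =>
    have hcast : ((n + 1 : Nat) : Int) = (n : Int) + 1 := by push_cast; ring
    rw [hcast, PySem.List.pyRange_one_succ_right (by positivity), List.foldl_append,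
      List.map_append, ih]
    rcases Nat.eq_zero_or_pos n with h0 | hpos
    · subst h0; simp
    · have hn0 : n ≠ 0 := Nat.pos_iff_ne_zero.mp hpos
      simp [hn0]
      ring

-- B's loop with a final a*count + d*idxsum equals an index-term sum over the enumeration.
theorem altB (a d : Int) : ∀ (bs : List Bool) (s c q : Int),
    (let p := (PySem.List.enumerate bs s).foldl
        (fun (st : Int × Int) (x : Int × Bool) => if x.2 then (st.1 + 1, st.2 + x.1) else st)
        (c, q)
     a * p.1 + d * p.2)
    = a * c + d * q + ((PySem.List.enumerate bs s).map (fun x => if x.2 then a + x.1 * d else 0)).sum := by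
  intro bs
  induction bs with
  | nil => intro s c q; simp [PySem.List.enumerate_nil]
  | cons b t ih =>
    intro s c q
    rw [PySem.List.enumerate_cons]
    cases b <;>
      simp only [List.foldl_cons, List.map_cons, List.sum_cons, Bool.false_eq_true,
        ite_false, ite_true] <;>
      rw [ih] <;> ring

-- ===== VERDICT (by name: the statement is the Claim_ definition above) =====
theorem solution_spec : Claim_equal_solution := by
  intro a d included _
  unfold Spec_solution
  simp only [solution, solution_alt]
  rw [buildA a d included.length, altB]
  simp only [Prod.mk.injEq]  -- reduce the pair projection left by buildA
  rw [PySem.List.enumerate_eq_map_pyRange (d := false), List.map_map]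
  have hbody : ∀ (r i : Int), i ∈ PySem.List.pyRange 0 (included.length : Int) 1 →
      (if PySem.List.pyGetD included i false then
          r + PySem.List.pyGetD ((PySem.List.pyRange 0 (included.length : Int) 1).map (fun i => a + i * d)) i 0
        else r)
      = r + (if PySem.List.pyGetD included i false then a + i * d else 0) := by
    intro r i hi
    rw [PySem.List.mem_pyRange_one] at hi
    rw [PySem.List.pyGetD_map_pyRange_of_nonneg _ _ _ _ hi.1 hi.2]
    split <;> ring
  have hre := PySem.List.foldl_congr_mem (PySem.List.pyRange 0 (included.length : Int) 1)
    (fun result i =>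
      if PySem.List.pyGetD included i false then
        result + PySem.List.pyGetD ((PySem.List.pyRange 0 (included.length : Int) 1).map (fun i => a + i * d)) i 0
      else result)
    (fun r i => r + (if PySem.List.pyGetD included i false then a + i * d else 0))
    0 (fun r i hi => hbody r i hi)
  rw [hre, PySem.List.foldl_add]
  simp [Function.comp_def]
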